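-- pv_equiv track=rewrite | github.com/gioannidis/deb_package_statistics | strings.py | find_last_of
-- ===== SOURCE A (Python) =====
-- def find_last_of(text: str, pattern: str) -> int:
--     """Finds the last occurrence of a character from a pattern in a given text.
--
--     Finds and returns the last position in `text` that represents any one
--     character from the given `patter`.
--
--     This is implemented by reversing the original string, as finding the last
--     occurrence in the original string is equivalent to finding the first
--     occurrence in the reversed string.
--
--     Args:
--         text: A string where the last matching character is being searched for.
--         pattern: A series of characters used as search patterns.
--
--     Returns:
--         An integer representing the index in `text` where the last match from
--         `pattern` is found. Returns -1 if no match is found.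
--     """
--     char_dict = dict.fromkeys(pattern)
--
--     def predicate(char: str) -> bool:
--         """Filters matching characters in the given pattern."""
--         return char in char_dict
--
--     text = text[::-1]
--
--     # NOTE: we specify to return `None` in case of no match, so that no
--     # exception is raised.
--     index = next((i for i, ch in enumerate(text) if predicate(ch)), None)
--
--     if index is None:
--         return -1
--
--     # Return the index corresponding to the original string, i.e., the last
--     # matching index.
--     return len(text) - index - 1
-- ===== SOURCE B (Python) =====
-- def find_last_of(text: str, pattern: str) -> int:
--     chars = set(pattern)
--     last = -1
--     for i, ch in enumerate(text):
--         if ch in chars: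
--             last = i
--     return last
-- ===== Notes on version B (the rewrite author's own statement) =====
-- stated objective: simpler
-- what changed: Replaces A's reverse-the-string, find-first-match-with-a-generator, then len-index-1 arithmetic by a single forward pass keeping a running last-match index accumulator.
import Mathlib
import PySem

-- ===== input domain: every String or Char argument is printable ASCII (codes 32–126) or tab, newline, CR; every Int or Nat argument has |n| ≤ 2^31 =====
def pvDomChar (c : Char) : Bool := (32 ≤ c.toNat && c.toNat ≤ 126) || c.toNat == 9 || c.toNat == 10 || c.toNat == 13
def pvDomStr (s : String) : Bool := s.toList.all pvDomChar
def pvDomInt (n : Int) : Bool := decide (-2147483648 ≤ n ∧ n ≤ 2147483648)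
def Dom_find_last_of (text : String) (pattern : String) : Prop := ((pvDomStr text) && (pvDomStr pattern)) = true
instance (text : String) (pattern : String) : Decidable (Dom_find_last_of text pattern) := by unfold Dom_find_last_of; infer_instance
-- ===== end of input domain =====

-- B is a plain forward pass with a running last-match accumulator: no string reversal,
-- no first-match search, no len-index-1 arithmetic (objective: simpler).

-- ===== PORT A =====
-- next((i for i, ch in enumerate(text) if predicate(ch)), None): first index whose char is in the dict
def pvAFirst (cs : List Char) (charDict : List Char) (i : Nat) : Option Nat :=
  match cs with
  | [] => none
  | c :: t => if charDict.contains c then some i else pvAFirst t charDict (i + 1)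

def find_last_of (text : String) (pattern : String) : Int :=
  -- char_dict = dict.fromkeys(pattern): its keys are pattern's distinct chars in order
  let charDict : List Char := PySem.List.dedup pattern.toList
  -- text = text[::-1]
  let rev : List Char := text.toList.reverse
  match pvAFirst rev charDict 0 with
  | none => -1
  | some i => (rev.length : Int) - (i : Int) - 1

-- ===== PORT B =====
def find_last_of_alt (text : String) (pattern : String) : Int :=
  let chars : PySem.Set Char := PySem.Set.ofList pattern.toList
  (PySem.List.enumerate text.toList).foldl
    (fun last p => if PySem.Set.contains chars p.2 then p.1 else last) (-1)

-- ===== PRECONDITION & SPEC =====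
def Spec_find_last_of (text : String) (pattern : String) (out : Int) : Prop := out = find_last_of_alt text pattern
instance (text : String) (pattern : String) (out : Int) : Decidable (Spec_find_last_of text pattern out) := by unfold Spec_find_last_of; infer_instance

-- ===== CLAIM (what is proved, stated in full; the proofs are below) =====
def Claim_equal_find_last_of : Prop := ∀ (text : String) (pattern : String), Dom_find_last_of text pattern → Spec_find_last_of text pattern (find_last_of text pattern)

-- ===== LEMMAS AND PROOFS =====

theorem pvAFirst_shift (cs charDict : List Char) (n : Nat) :
    pvAFirst cs charDict n = (pvAFirst cs charDict 0).map (n + ·) := by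
  induction cs generalizing n with
  | nil => simp [pvAFirst]
  | cons c t ih =>
    by_cases h : c ∈ charDict
    · simp [pvAFirst, h]
    · simp [pvAFirst, h, ih (n + 1), ih 1, Option.map_map]

theorem pvMain (l charDict : List Char) :
    (PySem.List.enumerate l).foldl
      (fun last p => if p.2 ∈ charDict then p.1 else last) (-1 : Int)
    = match pvAFirst l.reverse charDict 0 with
      | none => -1
      | some i => (l.length : Int) - (i : Int) - 1 := by
  induction l using List.reverseRecOn with
  | nil => simp [PySem.List.enumerate, pvAFirst]
  | append_singleton t c ih =>
    rw [PySem.List.enumerate_append]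
    simp only [List.reverse_append, List.reverse_singleton, List.singleton_append]
    by_cases h : c ∈ charDict
    · simp [PySem.List.enumerate, pvAFirst, h]
    · simp only [PySem.List.enumerate, pvAFirst, List.contains_eq_mem, h, decide_false,
        Bool.false_eq_true, if_false, List.foldl_append, List.foldl_cons, List.foldl_nil, ih]
      rw [pvAFirst_shift _ _ 1]
      cases hf : pvAFirst t.reverse charDict 0 with
      | none => simp
      | some i =>
        simp only [Option.map_some, List.length_append, List.length_cons, List.length_nil]
        push_cast; ring

-- ===== VERDICT (by name: the statement is the Claim_ definition above) =====
theorem find_last_of_spec : Claim_equal_find_last_of := by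
  intro text pattern _
  unfold Spec_find_last_of find_last_of find_last_of_alt
  simp only [List.length_reverse]
  rw [show (fun (last : Int) (p : Int × Char) =>
        if PySem.Set.contains (PySem.Set.ofList pattern.toList) p.2 then p.1 else last)
      = fun last p => if p.2 ∈ PySem.List.dedup pattern.toList then p.1 else last from by
        funext last p
        by_cases h : p.2 ∈ PySem.List.dedup pattern.toList
        · simp [h]
        · simp [h, PySem.Set.contains, PySem.Set.mem_ofList]]
  rw [pvMain]
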